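-- pv_equiv track=rewrite | github.com/Shikhanki-Sidana/mental-health-assistant | src/screening.py | score_phq9
-- ===== SOURCE A (Python) =====
-- def score_phq9(answers):
--     s = sum(int(a) for a in answers[:9])
--     if s >= 20: cat = "Severe depression"
--     elif s >=15: cat = "Moderately severe"
--     elif s >=10: cat = "Moderate"
--     elif s >=5: cat = "Mild"
--     else: cat = "None-minimal"
--     return s, cat
-- ===== SOURCE B (Python) =====
-- _BREAKS = [5, 10, 15, 20]
-- _LABELS = ["None-minimal", "Mild", "Moderate", "Moderately severe", "Severe depression"]
--
-- def _bisect_right(a, x):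
--     lo, hi = 0, len(a)
--     while lo < hi:
--         mid = (lo + hi) // 2
--         if x < a[mid]:
--             hi = mid
--         else:
--             lo = mid + 1
--     return lo
--
-- def score_phq9(answers):
--     s = sum(int(a) for a in answers[:9])
--     return s, _LABELS[_bisect_right(_BREAKS, s)]
-- ===== Notes on version B (the rewrite author's own statement) =====
-- stated objective: idiomatic
-- what changed: Replaces the if-elif severity ladder with a threshold table plus a hand-written bisect_right binary search into a parallel label table; the sum expression is unchanged.
import Mathlib
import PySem

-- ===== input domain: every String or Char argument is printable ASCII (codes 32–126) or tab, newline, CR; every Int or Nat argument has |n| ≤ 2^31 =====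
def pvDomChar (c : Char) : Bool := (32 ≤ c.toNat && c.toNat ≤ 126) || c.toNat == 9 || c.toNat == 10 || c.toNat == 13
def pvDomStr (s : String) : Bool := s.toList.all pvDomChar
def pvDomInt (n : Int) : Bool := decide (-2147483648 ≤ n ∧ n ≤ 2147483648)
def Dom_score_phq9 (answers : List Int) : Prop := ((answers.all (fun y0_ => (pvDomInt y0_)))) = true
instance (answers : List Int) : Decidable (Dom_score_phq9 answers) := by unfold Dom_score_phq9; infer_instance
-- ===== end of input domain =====

-- B replaces A's if-elif severity ladder by a threshold table searched with a hand-written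
-- bisect_right binary search indexing a parallel label table (objective: idiomatic).

-- ===== PORT A =====
def score_phq9 (answers : List Int) : Int × String :=
  let s := (PySem.List.slice answers none (some 9)).foldl (· + ·) 0
  let cat :=
    if s ≥ 20 then "Severe depression"
    else if s ≥ 15 then "Moderately severe"
    else if s ≥ 10 then "Moderate"
    else if s ≥ 5 then "Mild"
    else "None-minimal"
  (s, cat)

-- ===== PORT B =====
def pvBreaks : List Int := [5, 10, 15, 20]
def pvLabels : List String :=
  ["None-minimal", "Mild", "Moderate", "Moderately severe", "Severe depression"]

-- _bisect_right's while-loop; terminates since hi - lo shrinks. a[mid] is always in range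
-- for the in-bounds lo/hi this is called with, so getD is exact here.
def pvBisectGo (a : List Int) (x : Int) (lo hi : Nat) : Nat :=
  if lo < hi then
    let mid := (lo + hi) / 2
    if x < a.getD mid 0 then pvBisectGo a x lo mid
    else pvBisectGo a x (mid + 1) hi
  else lo
termination_by hi - lo
decreasing_by all_goals omega

def pvBisectRight (a : List Int) (x : Int) : Nat := pvBisectGo a x 0 a.length

def score_phq9_alt (answers : List Int) : Int × String :=
  let s := (PySem.List.slice answers none (some 9)).foldl (· + ·) 0
  (s, pvLabels.getD (pvBisectRight pvBreaks s) "")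

-- ===== PRECONDITION & SPEC =====
def Spec_score_phq9 (answers : List Int) (out : Int × String) : Prop := out = score_phq9_alt answers
instance (answers : List Int) (out : Int × String) : Decidable (Spec_score_phq9 answers out) := by unfold Spec_score_phq9; infer_instance

-- ===== CLAIM (what is proved, stated in full; the proofs are below) =====
def Claim_equal_score_phq9 : Prop := ∀ (answers : List Int), Dom_score_phq9 answers → Spec_score_phq9 answers (score_phq9 answers)

-- ===== LEMMAS AND PROOFS =====

-- the binary search over the fixed 4-entry table, fully unfolded and compared with the ladder
theorem pvLabel_eq (s : Int) :
    pvLabels.getD (pvBisectRight pvBreaks s) "" =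
      (if s ≥ 20 then "Severe depression"
       else if s ≥ 15 then "Moderately severe"
       else if s ≥ 10 then "Moderate"
       else if s ≥ 5 then "Mild"
       else "None-minimal") := by
  by_cases h5 : s < 5
  · simp [pvBisectRight, pvBreaks, pvLabels, pvBisectGo, h5,
      show s < 10 by omega, show s < 15 by omega,
      show ¬ s ≥ 20 by omega, show ¬ s ≥ 15 by omega, show ¬ s ≥ 10 by omega, show ¬ s ≥ 5 by omega]
  · by_cases h10 : s < 10
    · simp [pvBisectRight, pvBreaks, pvLabels, pvBisectGo, h5, h10,
        show s < 15 by omega,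
        show ¬ s ≥ 20 by omega, show ¬ s ≥ 15 by omega, show ¬ s ≥ 10 by omega, show s ≥ 5 by omega]
    · by_cases h15 : s < 15
      · simp [pvBisectRight, pvBreaks, pvLabels, pvBisectGo, h10, h15,
          show ¬ s ≥ 20 by omega, show ¬ s ≥ 15 by omega, show s ≥ 10 by omega]
      · by_cases h20 : s < 20
        · simp [pvBisectRight, pvBreaks, pvLabels, pvBisectGo, h15, h20,
            show ¬ s ≥ 20 by omega, show s ≥ 15 by omega]
        · simp [pvBisectRight, pvBreaks, pvLabels, pvBisectGo, h15, h20,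
            show s ≥ 20 by omega]

theorem score_phq9_spec : Claim_equal_score_phq9 := by
  intro answers _
  unfold Spec_score_phq9 score_phq9 score_phq9_alt
  simp only [pvLabel_eq]
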